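-- pv_equiv track=rewrite | github.com/ckoons/BubbleSpacetimeTheory | play/toy_1625_debye_predictions.py | bst_product_name
-- ===== SOURCE A (Python) =====
-- def factor(n):
--     """Prime factorization."""
--     if n == 0: return {}
--     factors = {}
--     d = 2
--     n = abs(n)
--     while d * d <= n:
--         while n % d == 0:
--             factors[d] = factors.get(d, 0) + 1
--             n //= d
--         d += 1
--     if n > 1:
--         factors[n] = factors.get(n, 0) + 1
--     return factors
--
-- def bst_product_name(n):
--     """Express n as BST integer product if possible."""
--     f = factor(n)
--     parts = []
--     known = {2: 'rank', 3: 'N_c', 5: 'n_C', 7: 'g'}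
--     for p in sorted(f.keys()):
--         if p in known:
--             if f[p] == 1:
--                 parts.append(known[p])
--             else:
--                 parts.append(f"{known[p]}^{f[p]}")
--         else:
--             parts.append(f"{p}^{f[p]}" if f[p] > 1 else str(p))
--     return '*'.join(parts) if parts else '1'
-- ===== SOURCE B (Python) =====
-- KNOWN = {2: 'rank', 3: 'N_c', 5: 'n_C', 7: 'g'}
--
-- def bst_product_name(n):
--     """Express n as BST integer product if possible."""
--     m = abs(n)
--     parts = []
--     if m > 1:
--         # integer square root of m
--         r = 1
--         while (r + 1) * (r + 1) <= m:
--             r += 1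
--         # Eratosthenes sieve: comp[j] == True marks a composite j
--         comp = [False] * (r + 1)
--         i = 2
--         while i <= r:
--             if not comp[i]:
--                 j = i * i
--                 while j <= r:
--                     comp[j] = True
--                     j += i
--             i += 1
--         # scan the primes only (fixed bound r); exponent by growing the power p**k
--         p = 2
--         while p <= r:
--             if not comp[p] and m % p == 0:
--                 pw, k = p, 1
--                 while m % (pw * p) == 0:
--                     pw *= p
--                     k += 1
--                 m //= pw
--                 name = KNOWN.get(p, str(p))
--                 parts.append(name if k == 1 else f"{name}^{k}")
--             p += 1
--         if m > 1:
--             parts.append(KNOWN.get(m, str(m)))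
--     return '*'.join(parts) if parts else '1'
-- ===== Notes on version B (the rewrite author's own statement) =====
-- stated objective: alternative
-- what changed: B first builds an Eratosthenes sieve up to isqrt(|n|) and scans only the sieved primes with a fixed bound, finds each exponent by growing the power p^k and doing one division per prime, and emits each formatted name part immediately in ascending order, replacing A's all-divisors trial loop with shrinking bound, per-factor repeated division, factor dict and sorted().
import Mathlib
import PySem

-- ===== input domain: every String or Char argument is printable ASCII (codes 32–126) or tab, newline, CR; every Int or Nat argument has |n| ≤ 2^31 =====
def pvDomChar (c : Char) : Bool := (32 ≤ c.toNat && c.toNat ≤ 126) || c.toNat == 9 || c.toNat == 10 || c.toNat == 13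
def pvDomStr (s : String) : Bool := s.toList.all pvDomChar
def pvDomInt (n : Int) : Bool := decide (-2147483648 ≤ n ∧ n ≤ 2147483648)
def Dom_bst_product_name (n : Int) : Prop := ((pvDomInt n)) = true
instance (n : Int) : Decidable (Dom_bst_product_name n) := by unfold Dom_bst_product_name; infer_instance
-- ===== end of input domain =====

-- B replaces A's all-divisors trial loop, factor dict and sorted() by a sieve of
-- Eratosthenes up to isqrt(|n|), a primes-only scan with a fixed bound that emits
-- formatted parts in ascending order, and exponent-by-growing-the-power with one
-- division per prime (objective: alternative).

-- ===== PORT A =====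

-- termination fact for the division loops (cited in decreasing_by)
theorem pv_div_toNat_lt (n d : Int) (hn : 0 < n) (hd : 2 ≤ d) :
    (PySem.Int.floordiv n d).toNat < n.toNat := by
  rw [PySem.Int.floordiv_eq_ediv_of_pos (by omega)]
  have h1 : n / d < n := Int.ediv_lt_of_lt_mul (by omega) (by nlinarith)
  have h2 : 0 ≤ n / d := Int.ediv_nonneg (le_of_lt hn) (by omega)
  omega

-- inner 'while n % d == 0' of A.factor (guard carries the loop invariants 0 < n, 2 ≤ d to totalize)
def pvInnerA (n d : Int) (f : PySem.Dict Int Int) : Int × PySem.Dict Int Int :=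
  if h : 0 < n ∧ 2 ≤ d ∧ PySem.Int.mod n d = 0 then
    pvInnerA (PySem.Int.floordiv n d) d (f.insert d (f.getD d 0 + 1))
  else (n, f)
termination_by n.toNat
decreasing_by exact pv_div_toNat_lt n d h.1 h.2.1

-- bound on the inner loop's result, cited by the outer loop's decreasing_by
theorem pv_fdiv_pos (n d : Int) (hn : 0 < n) (hd : 2 ≤ d) (hdvd : d ∣ n) :
    0 < PySem.Int.floordiv n d := by
  rw [PySem.Int.floordiv_eq_ediv_of_pos (by omega)]
  rcases hdvd with ⟨c, rfl⟩
  have hc : 0 < c := by nlinarith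
  rw [Int.mul_ediv_cancel_left _ (by omega : d ≠ 0)]
  exact hc

theorem pvInnerA_bounds (n d : Int) (f : PySem.Dict Int Int) :
    0 < n → 0 < (pvInnerA n d f).1 ∧ (pvInnerA n d f).1 ≤ n := by
  fun_induction pvInnerA n d f with
  | case1 n f h ih =>
    intro hn
    have hdvd : d ∣ n := (PySem.Int.mod_eq_zero_iff_dvd n d).mp h.2.2
    have hpos : 0 < PySem.Int.floordiv n d := pv_fdiv_pos n d h.1 h.2.1 hdvd
    have hle : PySem.Int.floordiv n d ≤ n := by
      have := pv_div_toNat_lt n d h.1 h.2.1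
      omega
    exact ⟨(ih hpos).1, le_trans (ih hpos).2 hle⟩
  | case2 n f h => intro hn; exact ⟨hn, le_refl n⟩

-- outer 'while d * d <= n' of A.factor
-- termination fact for A's outer loop (cited in decreasing_by)
theorem pv_outerA_dec (n d : Int) (f : PySem.Dict Int Int) (h : 2 ≤ d ∧ d * d ≤ n) :
    ((pvInnerA n d f).1 + 1 - (d + 1)).toNat < (n + 1 - d).toNat := by
  have hn : 0 < n := by nlinarith [h.1, h.2]
  have hd : d ≤ n := by nlinarith [h.1, h.2]
  have := pvInnerA_bounds n d f hn
  omega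

def pvOuterA (n d : Int) (f : PySem.Dict Int Int) : Int × PySem.Dict Int Int :=
  if h : 2 ≤ d ∧ d * d ≤ n then
    let p := pvInnerA n d f
    pvOuterA p.1 (d + 1) p.2
  else (n, f)
termination_by (n + 1 - d).toNat
decreasing_by exact pv_outerA_dec n d f h

def pvFactorA (n : Int) : PySem.Dict Int Int :=
  if n = 0 then PySem.Dict.empty
  else
    let p := pvOuterA |n| 2 PySem.Dict.empty
    if 1 < p.1 then p.2.insert p.1 (p.2.getD p.1 0 + 1) else p.2

def pvKnownA : PySem.Dict Int String :=
  PySem.Dict.ofList [(2, "rank"), (3, "N_c"), (5, "n_C"), (7, "g")]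

def bst_product_name (n : Int) : String :=
  let f := pvFactorA n
  -- f[p] is ported as f.getD p 0: p ranges over f's keys, so KeyError is unreachable
  let parts := (PySem.List.sorted f.keys (fun x => x) false).foldl
    (fun parts p =>
      if pvKnownA.contains p then
        if f.getD p 0 = 1 then parts ++ [pvKnownA.getD p ""]
        else parts ++ [pvKnownA.getD p "" ++ "^" ++ PySem.Int.toStr (f.getD p 0)]
      else
        if 1 < f.getD p 0 then parts ++ [PySem.Int.toStr p ++ "^" ++ PySem.Int.toStr (f.getD p 0)]
        else parts ++ [PySem.Int.toStr p]) []
  if parts ≠ [] then PySem.Str.join "*" parts else "1"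

-- ===== PORT B =====

def pvKnownB : PySem.Dict Int String :=
  PySem.Dict.ofList [(2, "rank"), (3, "N_c"), (5, "n_C"), (7, "g")]

-- KNOWN.get(d, str(d))
def pvNameOf (d : Int) : String := (pvKnownB.get? d).getD (PySem.Int.toStr d)

-- 'r = 1; while (r+1)*(r+1) <= m: r += 1' (guard carries the invariant 1 ≤ r to totalize)
-- termination fact for the isqrt loop (cited in decreasing_by)
theorem pv_isqrt_dec (m r : Int) (h : 1 ≤ r ∧ (r + 1) * (r + 1) ≤ m) :
    (m - (r + 1)).toNat < (m - r).toNat := by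
  have : 2 * (r + 1) ≤ m := by nlinarith [h.1, h.2]
  omega

def pvIsqrtB (m r : Int) : Int :=
  if h : 1 ≤ r ∧ (r + 1) * (r + 1) ≤ m then pvIsqrtB m (r + 1) else r
termination_by (m - r).toNat
decreasing_by exact pv_isqrt_dec m r h

-- termination fact for the loops advancing by a positive step (cited in decreasing_by)
theorem pv_step_dec (j i r : Int) (h : 1 ≤ i ∧ j ≤ r) :
    (r + 1 - (j + i)).toNat < (r + 1 - j).toNat := by omega

-- inner 'j = i*i; while j <= r: comp[j] = True; j += i' (invariant 1 ≤ i carried)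
def pvMarkB (r i j : Int) (comp : List Bool) : List Bool :=
  if h : 1 ≤ i ∧ j ≤ r then
    -- comp[j] = True : index j is nonnegative on every reachable state (j starts at i*i ≥ 1)
    pvMarkB r i (j + i) (comp.set j.toNat true)
  else comp
termination_by (r + 1 - j).toNat
decreasing_by exact pv_step_dec j i r h

-- 'i = 2; while i <= r: if not comp[i]: mark; i += 1'
def pvSieveB (r i : Int) (comp : List Bool) : List Bool :=
  if h : 2 ≤ i ∧ i ≤ r then
    pvSieveB r (i + 1)
      (if comp.getD i.toNat false = false then pvMarkB r i (i * i) comp else comp)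
  else comp
termination_by (r + 1 - i).toNat
decreasing_by exact pv_step_dec i 1 r ⟨le_refl 1, h.2⟩

-- 'pw, k = p, 1; while m % (pw*p) == 0: pw *= p; k += 1' (invariants 0 < m, 2 ≤ p, 0 < pw carried)
-- termination fact for the grow-the-power loop (cited in decreasing_by)
theorem pv_grow_dec (m p pw : Int)
    (h : 0 < m ∧ 2 ≤ p ∧ 0 < pw ∧ PySem.Int.mod m (pw * p) = 0) :
    (m - pw * p).toNat < (m - pw).toNat := by
  have hdvd : pw * p ∣ m := (PySem.Int.mod_eq_zero_iff_dvd m (pw * p)).mp h.2.2.2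
  have hle : pw * p ≤ m := Int.le_of_dvd h.1 hdvd
  have : pw < pw * p := by nlinarith [h.2.1, h.2.2.1]
  omega

def pvGrowB (m p pw k : Int) : Int × Int :=
  if h : 0 < m ∧ 2 ≤ p ∧ 0 < pw ∧ PySem.Int.mod m (pw * p) = 0 then
    pvGrowB m p (pw * p) (k + 1)
  else (pw, k)
termination_by (m - pw).toNat
decreasing_by exact pv_grow_dec m p pw h

-- 'p = 2; while p <= r: if not comp[p] and m % p == 0: …; p += 1'
def pvScanB (r : Int) (comp : List Bool) (p m : Int) (parts : List String) : Int × List String :=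
  if h : 2 ≤ p ∧ p ≤ r then
    if comp.getD p.toNat false = false ∧ PySem.Int.mod m p = 0 then
      let g := pvGrowB m p p 1
      let m' := PySem.Int.floordiv m g.1
      let name := pvNameOf p
      pvScanB r comp (p + 1) m'
        (parts ++ [if g.2 = 1 then name else name ++ "^" ++ PySem.Int.toStr g.2])
    else pvScanB r comp (p + 1) m parts
  else (m, parts)
termination_by (r + 1 - p).toNat
decreasing_by all_goals exact pv_step_dec p 1 r ⟨le_refl 1, h.2⟩

def bst_product_name_alt (n : Int) : String :=
  let m := |n|
  if 1 < m then
    let r := pvIsqrtB m 1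
    let comp := pvSieveB r 2 (List.replicate (r + 1).toNat false)
    let s := pvScanB r comp 2 m []
    let parts := if 1 < s.1 then s.2 ++ [pvNameOf s.1] else s.2
    if parts = [] then "1" else PySem.Str.join "*" parts
  else "1"

-- ===== PRECONDITION & SPEC =====
def Spec_bst_product_name (n : Int) (out : String) : Prop := out = bst_product_name_alt n
instance (n : Int) (out : String) : Decidable (Spec_bst_product_name n out) := by unfold Spec_bst_product_name; infer_instance

-- ===== CLAIM (what is proved, stated in full; the proofs are below) =====
def Claim_equal_bst_product_name : Prop := ∀ (n : Int), Dom_bst_product_name n → Spec_bst_product_name n (bst_product_name n)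

-- ===== LEMMAS AND PROOFS =====

-- reference division-out loop: (count, cofactor) of dividing d out of n
def pvDivOutB (m d k : Int) : Int × Int :=
  if h : 0 < m ∧ 2 ≤ d ∧ PySem.Int.mod m d = 0 then
    pvDivOutB (PySem.Int.floordiv m d) d (k + 1)
  else (k, m)
termination_by m.toNat
decreasing_by exact pv_div_toNat_lt m d h.1 h.2.1

theorem pvDivOutB_bounds (m d k : Int) :
    0 < m → 0 < (pvDivOutB m d k).2 ∧ (pvDivOutB m d k).2 ≤ m := by
  fun_induction pvDivOutB m d k with
  | case1 m k h ih =>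
    intro hm
    have hdvd : d ∣ m := (PySem.Int.mod_eq_zero_iff_dvd m d).mp h.2.2
    have hpos : 0 < PySem.Int.floordiv m d := pv_fdiv_pos m d h.1 h.2.1 hdvd
    have hle : PySem.Int.floordiv m d ≤ m := by
      have := pv_div_toNat_lt m d h.1 h.2.1
      omega
    exact ⟨(ih hpos).1, le_trans (ih hpos).2 hle⟩
  | case2 m k h => intro hm; exact ⟨hm, le_refl m⟩

-- the common factor list both pipelines produce: ascending (prime, exponent) pairs plus leftover cofactor
def pvFac (n d : Int) : Int × List (Int × Int) :=
  if h : 2 ≤ d ∧ d * d ≤ n then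
    if PySem.Int.mod n d = 0 then
      let p := pvDivOutB n d 0
      let r := pvFac p.2 (d + 1)
      (r.1, (d, p.1) :: r.2)
    else pvFac n (d + 1)
  else (n, [])
termination_by (n + 1 - d).toNat
decreasing_by
  · have hm : 0 < n := by nlinarith [h.1, h.2]
    have hd : d ≤ n := by nlinarith [h.1, h.2]
    have := pvDivOutB_bounds n d 0 hm
    omega
  · have hd : d ≤ n := by nlinarith [h.1, h.2]
    omega

-- B's per-prime formatting, as a function of the (prime, exponent) pair
def pvFmt (q : Int × Int) : String :=
  if q.2 = 1 then pvNameOf q.1 else pvNameOf q.1 ++ "^" ++ PySem.Int.toStr q.2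

-- A's per-prime formatting, as a function of the (prime, exponent) pair
def pvFmtA (q : Int × Int) : String :=
  if pvKnownA.contains q.1 then
    if q.2 = 1 then pvKnownA.getD q.1 ""
    else pvKnownA.getD q.1 "" ++ "^" ++ PySem.Int.toStr q.2
  else
    if 1 < q.2 then PySem.Int.toStr q.1 ++ "^" ++ PySem.Int.toStr q.2
    else PySem.Int.toStr q.1

theorem pvDivOutB_shift_fuel (N : Nat) : ∀ (m d k : Int), m.toNat ≤ N →
    pvDivOutB m d k = (k + (pvDivOutB m d 0).1, (pvDivOutB m d 0).2) := by
  induction N with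
  | zero =>
    intro m d k h
    have hg : ¬(0 < m ∧ 2 ≤ d ∧ PySem.Int.mod m d = 0) := fun hc => absurd hc.1 (by omega)
    rw [pvDivOutB, dif_neg hg, pvDivOutB, dif_neg hg]
    simp
  | succ N ih =>
    intro m d k h
    by_cases hg : 0 < m ∧ 2 ≤ d ∧ PySem.Int.mod m d = 0
    · have hlt := pv_div_toNat_lt m d hg.1 hg.2.1
      rw [pvDivOutB, dif_pos hg]
      conv_rhs => rw [pvDivOutB, dif_pos hg]
      rw [ih _ d (k + 1) (by omega), ih _ d (0 + 1) (by omega)]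
      refine Prod.ext ?_ rfl
      simp; ring
    · rw [pvDivOutB, dif_neg hg, pvDivOutB, dif_neg hg]
      simp

theorem pvDivOutB_shift (m d k : Int) :
    pvDivOutB m d k = (k + (pvDivOutB m d 0).1, (pvDivOutB m d 0).2) :=
  pvDivOutB_shift_fuel m.toNat m d k le_rfl

theorem pvDivOutB_fst_nonneg (m d k : Int) : 0 ≤ k → 0 ≤ (pvDivOutB m d k).1 := by
  fun_induction pvDivOutB m d k with
  | case1 m k h ih => intro hk; exact ih (by omega)
  | case2 m k h => intro hk; exact hk

theorem pvDivOutB_not_dvd (m d k : Int) : 0 < m → 2 ≤ d → ¬ d ∣ (pvDivOutB m d k).2 := by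
  fun_induction pvDivOutB m d k with
  | case1 m k h ih =>
    intro _ _
    have hpos := pv_fdiv_pos m d h.1 h.2.1 ((PySem.Int.mod_eq_zero_iff_dvd m d).mp h.2.2)
    exact ih hpos h.2.1
  | case2 m k h =>
    intro hm hd hdvd
    exact h ⟨hm, hd, (PySem.Int.mod_eq_zero_iff_dvd m d).mpr hdvd⟩

theorem pvDivOutB_dvd (m d k : Int) : 0 < m → 2 ≤ d → (pvDivOutB m d k).2 ∣ m := by
  fun_induction pvDivOutB m d k with
  | case1 m k h ih =>
    intro hm hd
    have hdvd := (PySem.Int.mod_eq_zero_iff_dvd m d).mp h.2.2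
    have hpos := pv_fdiv_pos m d hm hd hdvd
    have hmul : PySem.Int.floordiv m d * d = m := by
      have h2 := PySem.Int.floordiv_mul_add_mod m d
      rw [h.2.2] at h2
      linarith
    exact dvd_trans (ih hpos hd) ⟨d, hmul.symm⟩
  | case2 m k h => intro _ _; exact dvd_refl m

-- the cofactor times d^count gives m back
theorem pvDivOutB_prod_fuel (N : Nat) : ∀ (m d : Int), m.toNat ≤ N → 0 < m → 2 ≤ d →
    (pvDivOutB m d 0).2 * d ^ (pvDivOutB m d 0).1.toNat = m := by
  induction N with
  | zero => intro m d h hm hd; omega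
  | succ N ih =>
    intro m d h hm hd
    by_cases hdvd : PySem.Int.mod m d = 0
    · have hg : 0 < m ∧ 2 ≤ d ∧ PySem.Int.mod m d = 0 := ⟨hm, hd, hdvd⟩
      have hdvd' : d ∣ m := (PySem.Int.mod_eq_zero_iff_dvd m d).mp hdvd
      have hm' : 0 < PySem.Int.floordiv m d := pv_fdiv_pos m d hm hd hdvd'
      have hlt := pv_div_toNat_lt m d hm hd
      have hD : pvDivOutB m d 0 =
          (1 + (pvDivOutB (PySem.Int.floordiv m d) d 0).1,
           (pvDivOutB (PySem.Int.floordiv m d) d 0).2) := by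
        rw [pvDivOutB, dif_pos hg]
        exact pvDivOutB_shift (PySem.Int.floordiv m d) d (0 + 1)
      have hK := pvDivOutB_fst_nonneg (PySem.Int.floordiv m d) d 0 le_rfl
      have hmul : PySem.Int.floordiv m d * d = m := by
        have h2 := PySem.Int.floordiv_mul_add_mod m d
        rw [hdvd] at h2
        linarith
      rw [hD]
      simp only []
      have htn : (1 + (pvDivOutB (PySem.Int.floordiv m d) d 0).1).toNat
          = (pvDivOutB (PySem.Int.floordiv m d) d 0).1.toNat + 1 := by omega
      rw [htn, pow_succ, ← mul_assoc, ih _ d (by omega) hm' hd, hmul]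
    · have hg : ¬(0 < m ∧ 2 ≤ d ∧ PySem.Int.mod m d = 0) := fun hc => hdvd hc.2.2
      rw [pvDivOutB, dif_neg hg]
      simp

theorem pvDivOutB_prod (m d : Int) (hm : 0 < m) (hd : 2 ≤ d) :
    (pvDivOutB m d 0).2 * d ^ (pvDivOutB m d 0).1.toNat = m :=
  pvDivOutB_prod_fuel m.toNat m d le_rfl hm hd

-- A's inner while loop is one full division-out step: same cofactor, one dict entry bumped by the count
theorem pvInnerA_eq_fuel (N : Nat) : ∀ (m d : Int) (f : PySem.Dict Int Int),
    m.toNat ≤ N → 0 < m → 2 ≤ d →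
    pvInnerA m d f = ((pvDivOutB m d 0).2,
      if PySem.Int.mod m d = 0 then f.insert d (f.getD d 0 + (pvDivOutB m d 0).1) else f) := by
  induction N with
  | zero => intro m d f h hm hd; omega
  | succ N ih =>
    intro m d f h hm hd
    by_cases hdvd : PySem.Int.mod m d = 0
    · have hg : 0 < m ∧ 2 ≤ d ∧ PySem.Int.mod m d = 0 := ⟨hm, hd, hdvd⟩
      have hdvd' : d ∣ m := (PySem.Int.mod_eq_zero_iff_dvd m d).mp hdvd
      have hm' : 0 < PySem.Int.floordiv m d := pv_fdiv_pos m d hm hd hdvd'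
      have hlt := pv_div_toNat_lt m d hm hd
      have hD : pvDivOutB m d 0 =
          (1 + (pvDivOutB (PySem.Int.floordiv m d) d 0).1,
           (pvDivOutB (PySem.Int.floordiv m d) d 0).2) := by
        rw [pvDivOutB, dif_pos hg]
        exact pvDivOutB_shift (PySem.Int.floordiv m d) d (0 + 1)
      rw [pvInnerA, dif_pos hg, ih _ d _ (by omega) hm' hd, if_pos hdvd, hD]
      by_cases hdvd2 : PySem.Int.mod (PySem.Int.floordiv m d) d = 0
      · rw [if_pos hdvd2, PySem.Dict.getD_insert_self, PySem.Dict.insert_insert_self]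
        rw [add_assoc]
      · rw [if_neg hdvd2]
        have h0 : pvDivOutB (PySem.Int.floordiv m d) d 0 = (0, PySem.Int.floordiv m d) := by
          rw [pvDivOutB, dif_neg (fun hc => hdvd2 hc.2.2)]
        rw [h0]
        simp
    · have hg : ¬(0 < m ∧ 2 ≤ d ∧ PySem.Int.mod m d = 0) := fun hc => hdvd hc.2.2
      have h0 : pvDivOutB m d 0 = (0, m) := by rw [pvDivOutB, dif_neg hg]
      rw [pvInnerA, dif_neg hg, if_neg hdvd, h0]

theorem pvInnerA_eq (m d : Int) (f : PySem.Dict Int Int) (hm : 0 < m) (hd : 2 ≤ d) :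
    pvInnerA m d f = ((pvDivOutB m d 0).2,
      if PySem.Int.mod m d = 0 then f.insert d (f.getD d 0 + (pvDivOutB m d 0).1) else f) :=
  pvInnerA_eq_fuel m.toNat m d f le_rfl hm hd

-- unfolding equations for pvFac
theorem pvFac_cons (n d : Int) (hg : 2 ≤ d ∧ d * d ≤ n) (hdvd : PySem.Int.mod n d = 0) :
    pvFac n d = ((pvFac (pvDivOutB n d 0).2 (d + 1)).1,
      (d, (pvDivOutB n d 0).1) :: (pvFac (pvDivOutB n d 0).2 (d + 1)).2) := by
  rw [pvFac, dif_pos hg, if_pos hdvd]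

theorem pvFac_skip (n d : Int) (hg : 2 ≤ d ∧ d * d ≤ n) (hdvd : ¬ PySem.Int.mod n d = 0) :
    pvFac n d = pvFac n (d + 1) := by
  rw [pvFac, dif_pos hg, if_neg hdvd]

-- A's outer loop appends exactly the pvFac pairs to the dict (fresh, increasing keys)
theorem pvOuterA_eq_fuel (N : Nat) : ∀ (m d : Int) (f : PySem.Dict Int Int),
    (m + 1 - d).toNat ≤ N → 2 ≤ d → (∀ p ∈ f.keys, p < d) →
    pvOuterA m d f = ((pvFac m d).1, PySem.Dict.mk (f.items ++ (pvFac m d).2)) := by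
  induction N with
  | zero =>
    intro m d f h hd hkeys
    have hg : ¬(2 ≤ d ∧ d * d ≤ m) := by
      intro hc
      have : d ≤ m := by nlinarith [hc.1, hc.2]
      omega
    rw [pvOuterA, dif_neg hg, pvFac, dif_neg hg]
    simp
  | succ N ih =>
    intro m d f h hd hkeys
    by_cases hg : 2 ≤ d ∧ d * d ≤ m
    · have hm : 0 < m := by nlinarith [hg.1, hg.2]
      have hdm : d ≤ m := by nlinarith [hg.1, hg.2]
      rw [pvOuterA, dif_pos hg]
      simp only [pvInnerA_eq m d f hm hd]
      by_cases hdvd : PySem.Int.mod m d = 0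
      · have hb := pvDivOutB_bounds m d 0 hm
        have hcont : f.contains d = false := by
          cases hc : f.contains d with
          | false => rfl
          | true => exact absurd (hkeys d ((PySem.Dict.contains_iff_mem_keys f d).mp hc)) (by omega)
        rw [if_pos hdvd, PySem.Dict.getD_of_not_contains f 0 hcont, zero_add]
        have hkeys' : ∀ p ∈ (f.insert d (pvDivOutB m d 0).1).keys, p < d + 1 := by
          intro p hp
          rcases (PySem.Dict.mem_keys_insert f d p (pvDivOutB m d 0).1).mp hp with h1 | h1
          · omega
          · have := hkeys p h1; omega
        rw [ih ((pvDivOutB m d 0).2) (d + 1) (f.insert d (pvDivOutB m d 0).1) (by omega) (by omega) hkeys']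
        rw [PySem.Dict.items_insert_of_not_contains f (pvDivOutB m d 0).1 hcont]
        rw [pvFac_cons m d hg hdvd]
        simp [List.append_assoc]
      · rw [if_neg hdvd]
        have h0 : pvDivOutB m d 0 = (0, m) := by
          rw [pvDivOutB, dif_neg (fun hc => hdvd hc.2.2)]
        simp only [h0]
        rw [ih m (d + 1) f (by omega) (by omega) (fun p hp => by have := hkeys p hp; omega)]
        rw [pvFac_skip m d hg hdvd]
    · rw [pvOuterA, dif_neg hg, pvFac, dif_neg hg]
      simp

-- no divisor below d divides n
def pvNF (n d : Int) : Prop := ∀ e : Int, 2 ≤ e → e < d → ¬ e ∣ n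

-- structure of pvFac: exponents ≥ 1, strictly increasing keys ≥ d, cofactor above every key
theorem pvFac_struct_fuel (N : Nat) : ∀ (n d : Int), (n + 1 - d).toNat ≤ N →
    0 < n → 2 ≤ d → pvNF n d →
    0 < (pvFac n d).1 ∧
    (∀ p ∈ (pvFac n d).2, d ≤ p.1 ∧ 1 ≤ p.2) ∧
    (pvFac n d).2.Pairwise (fun a b => a.1 < b.1) ∧
    (1 < (pvFac n d).1 → (∀ p ∈ (pvFac n d).2, p.1 < (pvFac n d).1) ∧ d ≤ (pvFac n d).1) := by
  induction N with
  | zero =>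
    intro n d h hn hd hNF
    have hg : ¬(2 ≤ d ∧ d * d ≤ n) := by
      intro hc
      have : d ≤ n := by nlinarith [hc.1, hc.2]
      omega
    rw [pvFac, dif_neg hg]
    refine ⟨hn, by simp, by simp, fun h1 => ⟨by simp, ?_⟩⟩
    by_contra hlt
    exact hNF n (by omega) (by omega) (dvd_refl n)
  | succ N ih =>
    intro n d h hn hd hNF
    by_cases hg : 2 ≤ d ∧ d * d ≤ n
    · have hdm : d ≤ n := by nlinarith [hg.1, hg.2]
      by_cases hdvd : PySem.Int.mod n d = 0
      · have hb := pvDivOutB_bounds n d 0 hn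
        have hdvd' : d ∣ n := (PySem.Int.mod_eq_zero_iff_dvd n d).mp hdvd
        have hm'dvd : (pvDivOutB n d 0).2 ∣ n := pvDivOutB_dvd n d 0 hn hd
        have hnd : ¬ d ∣ (pvDivOutB n d 0).2 := pvDivOutB_not_dvd n d 0 hn hd
        have hk1 : 1 ≤ (pvDivOutB n d 0).1 := by
          have hD : pvDivOutB n d 0 = pvDivOutB (PySem.Int.floordiv n d) d (0 + 1) := by
            rw [pvDivOutB, dif_pos ⟨hn, hd, hdvd⟩]
          rw [hD, pvDivOutB_shift]
          have := pvDivOutB_fst_nonneg (PySem.Int.floordiv n d) d 0 le_rfl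
          simp
          omega
        have hNF' : pvNF (pvDivOutB n d 0).2 (d + 1) := by
          intro e he hlt hdvde
          by_cases hed : e = d
          · exact hnd (hed ▸ hdvde)
          · exact hNF e he (by omega) (hdvde.trans hm'dvd)
        obtain ⟨C1, C2, C3, C45⟩ := ih (pvDivOutB n d 0).2 (d + 1) (by omega) hb.1 (by omega) hNF'
        rw [pvFac, dif_pos hg, if_pos hdvd]
        simp only []
        refine ⟨C1, ?_, ?_, ?_⟩
        · intro p hp
          rcases List.mem_cons.mp hp with h1 | h1
          · subst h1; exact ⟨le_refl d, hk1⟩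
          · have := C2 p h1; exact ⟨by omega, this.2⟩
        · exact List.Pairwise.cons (fun b hb2 => by have := C2 b hb2; omega) C3
        · intro h1
          obtain ⟨C4, C5⟩ := C45 h1
          refine ⟨?_, by omega⟩
          intro p hp
          rcases List.mem_cons.mp hp with h2 | h2
          · subst h2; omega
          · exact C4 p h2
      · have hNF' : pvNF n (d + 1) := by
          intro e he hlt hdvde
          by_cases hed : e = d
          · exact hdvd ((PySem.Int.mod_eq_zero_iff_dvd n d).mpr (hed ▸ hdvde))
          · exact hNF e he (by omega) hdvde
        obtain ⟨C1, C2, C3, C45⟩ := ih n (d + 1) (by omega) hn (by omega) hNF'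
        rw [pvFac, dif_pos hg, if_neg hdvd]
        refine ⟨C1, fun p hp => ⟨by have := C2 p hp; omega, (C2 p hp).2⟩, C3, fun h1 => ⟨(C45 h1).1, by have := (C45 h1).2; omega⟩⟩
    · rw [pvFac, dif_neg hg]
      refine ⟨hn, by simp, by simp, fun h1 => ⟨by simp, ?_⟩⟩
      by_contra hlt
      exact hNF n (by omega) (by omega) (dvd_refl n)

-- A's formatting fold over keys with correct lookups is a map of pvFmtA
theorem pvFoldA (f : PySem.Dict Int Int) : ∀ (L : List (Int × Int)) (acc : List String),
    (∀ p ∈ L, f.getD p.1 0 = p.2) →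
    (L.map Prod.fst).foldl
      (fun parts p =>
        if pvKnownA.contains p then
          if f.getD p 0 = 1 then parts ++ [pvKnownA.getD p ""]
          else parts ++ [pvKnownA.getD p "" ++ "^" ++ PySem.Int.toStr (f.getD p 0)]
        else
          if 1 < f.getD p 0 then parts ++ [PySem.Int.toStr p ++ "^" ++ PySem.Int.toStr (f.getD p 0)]
          else parts ++ [PySem.Int.toStr p]) acc
      = acc ++ L.map pvFmtA := by
  intro L
  induction L with
  | nil => intro acc h; simp
  | cons q t iht =>
    intro acc h
    have hq : f.getD q.1 0 = q.2 := h q (by simp)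
    simp only [List.map_cons, List.foldl_cons]
    rw [iht _ (fun p hp => h p (by simp [hp]))]
    have hstep : (if pvKnownA.contains q.1 then
          if f.getD q.1 0 = 1 then acc ++ [pvKnownA.getD q.1 ""]
          else acc ++ [pvKnownA.getD q.1 "" ++ "^" ++ PySem.Int.toStr (f.getD q.1 0)]
        else
          if 1 < f.getD q.1 0 then acc ++ [PySem.Int.toStr q.1 ++ "^" ++ PySem.Int.toStr (f.getD q.1 0)]
          else acc ++ [PySem.Int.toStr q.1]) = acc ++ [pvFmtA q] := by
      simp only [hq, pvFmtA]
      split_ifs <;> rfl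
    rw [hstep]
    simp

-- A's and B's formatting agree on every pair with exponent ≥ 1
theorem pvFmt_eq (q : Int × Int) (h1 : 1 ≤ q.2) : pvFmtA q = pvFmt q := by
  unfold pvFmtA pvFmt pvNameOf
  have hk : pvKnownB = pvKnownA := rfl
  rw [hk]
  cases hg : pvKnownA.get? q.1 with
  | none =>
    have hc : pvKnownA.contains q.1 = false := by
      rw [PySem.Dict.contains_eq_isSome_get?, hg]; rfl
    rw [hc]
    simp only [Bool.false_eq_true, if_false, Option.getD_none]
    split_ifs <;> first | rfl | omega
  | some s =>
    have hc : pvKnownA.contains q.1 = true := by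
      rw [PySem.Dict.contains_eq_isSome_get?, hg]; rfl
    have hgd : pvKnownA.getD q.1 "" = s := PySem.Dict.getD_of_get?_eq_some pvKnownA "" hg
    rw [hc, hgd]
    rw [if_pos rfl]
    simp only [Option.getD_some]

-- rendering A's pipeline on a dict whose items are a strictly-key-increasing pair list with exponents ≥ 1
theorem pvAssemble (L : List (Int × Int)) (hpair : (L.map Prod.fst).Pairwise (· < ·))
    (hval : ∀ p ∈ L, 1 ≤ p.2) :
    (if ((PySem.List.sorted (PySem.Dict.mk L).keys (fun x => x) false).foldl
      (fun parts p =>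
        if pvKnownA.contains p then
          if (PySem.Dict.mk L).getD p 0 = 1 then parts ++ [pvKnownA.getD p ""]
          else parts ++ [pvKnownA.getD p "" ++ "^" ++ PySem.Int.toStr ((PySem.Dict.mk L).getD p 0)]
        else
          if 1 < (PySem.Dict.mk L).getD p 0 then
            parts ++ [PySem.Int.toStr p ++ "^" ++ PySem.Int.toStr ((PySem.Dict.mk L).getD p 0)]
          else parts ++ [PySem.Int.toStr p]) []) ≠ [] then
      PySem.Str.join "*" ((PySem.List.sorted (PySem.Dict.mk L).keys (fun x => x) false).foldl
      (fun parts p =>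
        if pvKnownA.contains p then
          if (PySem.Dict.mk L).getD p 0 = 1 then parts ++ [pvKnownA.getD p ""]
          else parts ++ [pvKnownA.getD p "" ++ "^" ++ PySem.Int.toStr ((PySem.Dict.mk L).getD p 0)]
        else
          if 1 < (PySem.Dict.mk L).getD p 0 then
            parts ++ [PySem.Int.toStr p ++ "^" ++ PySem.Int.toStr ((PySem.Dict.mk L).getD p 0)]
          else parts ++ [PySem.Int.toStr p]) [])
    else "1")
    = (if L.map pvFmt = [] then "1" else PySem.Str.join "*" (L.map pvFmt)) := by
  have hnd : (L.map Prod.fst).Nodup := hpair.imp (fun h => ne_of_lt h)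
  have hsort : PySem.List.sorted (PySem.Dict.mk L).keys (fun x => x) = L.map Prod.fst :=
    PySem.List.sorted_eq_of_perm_of_pairwise_lt _ _ _ (List.Perm.refl _) hpair
  have hget : ∀ p ∈ L, (PySem.Dict.mk L).getD p.1 0 = p.2 := by
    intro p hp
    exact PySem.Dict.getD_of_mem_items (PySem.Dict.mk L) (by simpa using hp) hnd 0
  rw [hsort, pvFoldA (PySem.Dict.mk L) L [] hget]
  have hmap : L.map pvFmtA = L.map pvFmt :=
    List.map_congr_left (fun q hq => pvFmt_eq q (hval q hq))
  rw [List.nil_append, hmap]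
  by_cases hE : L.map pvFmt = []
  · rw [if_neg (by simpa using hE), if_pos hE]
  · rw [if_pos hE, if_neg hE]

-- A's output, expressed through pvFac (proved from the old machinery; used for both sides)
theorem pvA_canon (n : Int) (hn : n ≠ 0) :
    bst_product_name n =
      (if ((pvFac |n| 2).2 ++ (if 1 < (pvFac |n| 2).1 then [((pvFac |n| 2).1, 1)] else [])).map pvFmt = [] then "1"
       else PySem.Str.join "*" (((pvFac |n| 2).2 ++ (if 1 < (pvFac |n| 2).1 then [((pvFac |n| 2).1, 1)] else [])).map pvFmt)) := by
  have ha : 0 < |n| := abs_pos.mpr hn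
  obtain ⟨hC1, hC2, hC3, hC45⟩ :=
    pvFac_struct_fuel ((|n| + 1 - 2).toNat) |n| 2 le_rfl ha (by omega)
      (fun e he hlt => False.elim (by omega))
  have hOA := pvOuterA_eq_fuel ((|n| + 1 - 2).toNat) |n| 2 PySem.Dict.empty le_rfl (by omega)
    (by intro p hp; simp [PySem.Dict.keys_empty] at hp)
  by_cases h1 : 1 < (pvFac |n| 2).1
  · -- leftover cofactor appended as one extra pair (exponent 1)
    rw [if_pos h1]
    have hC4 := (hC45 h1).1
    have hcontM : (PySem.Dict.mk (pvFac |n| 2).2).contains (pvFac |n| 2).1 = false := by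
      cases hc : (PySem.Dict.mk (pvFac |n| 2).2).contains (pvFac |n| 2).1 with
      | false => rfl
      | true =>
        have hmem := (PySem.Dict.contains_iff_mem_keys _ _).mp hc
        obtain ⟨p, hp, hpm⟩ := List.mem_map.mp hmem
        have := hC4 p hp
        omega
    have hf : pvFactorA n = PySem.Dict.mk ((pvFac |n| 2).2 ++ [((pvFac |n| 2).1, 1)]) := by
      rw [pvFactorA, if_neg hn]
      simp only [hOA]
      simp only [show (PySem.Dict.empty : PySem.Dict Int Int).items = [] from rfl, List.nil_append]
      rw [if_pos h1, PySem.Dict.getD_of_not_contains _ 0 hcontM, zero_add]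
      exact PySem.Dict.ext (PySem.Dict.items_insert_of_not_contains _ 1 hcontM)
    have hLpair : ((((pvFac |n| 2).2 ++ [((pvFac |n| 2).1, 1)])).map Prod.fst).Pairwise (· < ·) := by
      rw [List.map_append]
      rw [List.pairwise_append]
      refine ⟨List.pairwise_map.mpr hC3, by simp, ?_⟩
      intro a hma b hmb
      obtain ⟨p, hp, hpa⟩ := List.mem_map.mp hma
      simp at hmb
      subst hmb
      have := hC4 p hp
      omega
    have hLval : ∀ p ∈ (pvFac |n| 2).2 ++ [((pvFac |n| 2).1, 1)], 1 ≤ p.2 := by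
      intro p hp
      rcases List.mem_append.mp hp with h2 | h2
      · exact (hC2 p h2).2
      · simp at h2; subst h2; simp
    simp only [bst_product_name, hf]
    exact pvAssemble _ hLpair hLval
  · rw [if_neg h1, List.append_nil]
    have hf : pvFactorA n = PySem.Dict.mk (pvFac |n| 2).2 := by
      rw [pvFactorA, if_neg hn]
      simp only [hOA]
      simp only [show (PySem.Dict.empty : PySem.Dict Int Int).items = [] from rfl, List.nil_append]
      rw [if_neg h1]
    have hLpair : (((pvFac |n| 2).2).map Prod.fst).Pairwise (· < ·) := List.pairwise_map.mpr hC3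
    have hLval : ∀ p ∈ (pvFac |n| 2).2, 1 ≤ p.2 := fun p hp => (hC2 p hp).2
    simp only [bst_product_name, hf]
    exact pvAssemble _ hLpair hLval

-- ========== B-side lemmas ==========

-- pvIsqrtB computes the integer square root
theorem pvIsqrtB_spec (m : Int) : ∀ (r : Int), 1 ≤ r → r * r ≤ m →
    1 ≤ pvIsqrtB m r ∧ pvIsqrtB m r * pvIsqrtB m r ≤ m ∧ m < (pvIsqrtB m r + 1) * (pvIsqrtB m r + 1) := by
  intro r
  fun_induction pvIsqrtB m r with
  | case1 r h ih => intro _ _; exact ih (by omega) h.2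
  | case2 r h =>
    intro hr hle
    refine ⟨hr, hle, ?_⟩
    by_contra hc
    exact h ⟨hr, by omega⟩

-- a composite number (as a Nat index)
def pvCompN (x : Nat) : Prop := ∃ a b : Nat, 2 ≤ a ∧ 2 ≤ b ∧ x = a * b

-- reading a list after a set: either the set index or the old value
theorem pv_getD_set (l : List Bool) (n x : Nat) :
    (l.set n true).getD x false = true → x = n ∨ l.getD x false = true := by
  intro h
  by_cases hx : x = n
  · exact Or.inl hx
  · right
    rw [List.getD_eq_getElem?_getD] at h ⊢
    rwa [List.getElem?_set_ne (fun he => hx he.symm)] at h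

-- marking only ever sets composite indices
theorem pvMarkB_sound (r i : Int) : ∀ (j : Int) (comp : List Bool) (x : Nat),
    2 ≤ i → (∃ u : Int, 2 ≤ u ∧ j = i * u) →
    (pvMarkB r i j comp).getD x false = true → comp.getD x false = true ∨ pvCompN x := by
  intro j comp x
  fun_induction pvMarkB r i j comp with
  | case1 j comp h ih =>
    intro hi hex hres
    obtain ⟨u, hu, rfl⟩ := hex
    have hex' : ∃ u' : Int, 2 ≤ u' ∧ i * u + i = i * u' := ⟨u + 1, by omega, by ring⟩
    rcases ih hi hex' hres with hset | hcomp
    · rcases pv_getD_set comp (i * u).toNat x hset with hx | hold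
      · right
        subst hx
        have hi0 : (0 : Int) ≤ i := by omega
        have hu0 : (0 : Int) ≤ u := by omega
        refine ⟨i.toNat, u.toNat, by omega, by omega, ?_⟩
        have hcast : i * u = ((i.toNat * u.toNat : Nat) : Int) := by
          push_cast
          rw [Int.toNat_of_nonneg hi0, Int.toNat_of_nonneg hu0]
        rw [hcast, Int.toNat_natCast]
      · exact Or.inl hold
    · exact Or.inr hcomp
  | case2 j comp h =>
    intro _ _ hres
    exact Or.inl hres

theorem pvSieveB_sound (r : Int) : ∀ (i : Int) (comp : List Bool) (x : Nat),
    2 ≤ i →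
    (pvSieveB r i comp).getD x false = true → comp.getD x false = true ∨ pvCompN x := by
  intro i comp x
  fun_induction pvSieveB r i comp with
  | case1 i comp h ih =>
    intro hi hres
    rcases ih (by omega) hres with hmid | hcomp
    · by_cases hflag : comp.getD i.toNat false = false
      · rw [dif_pos hflag] at hmid
        exact pvMarkB_sound r i (i * i) comp x h.1 ⟨i, h.1, rfl⟩ hmid
      · rw [dif_neg hflag] at hmid
        exact Or.inl hmid
    · exact Or.inr hcomp
  | case2 i comp h =>
    intro _ hres
    exact Or.inl hres

-- pvGrowB finds the maximal power: result (pw*p^e, k+e) with pw*p^e ∣ m and pw*p^(e+1) ∤ m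
theorem pvGrowB_spec (m p : Int) : ∀ (pw k : Int), 0 < m → 2 ≤ p → 0 < pw → pw ∣ m →
    (pvGrowB m p pw k).1 ∣ m ∧ ¬ ((pvGrowB m p pw k).1 * p ∣ m) ∧
    ∃ e : Nat, (pvGrowB m p pw k).1 = pw * p ^ e ∧ (pvGrowB m p pw k).2 = k + e := by
  intro pw k
  fun_induction pvGrowB m p pw k with
  | case1 pw k h ih =>
    intro hm hp hpw _
    have hdvd : pw * p ∣ m := (PySem.Int.mod_eq_zero_iff_dvd m (pw * p)).mp h.2.2.2
    obtain ⟨H1, H2, e, He1, He2⟩ := ih hm hp (by positivity) hdvd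
    refine ⟨H1, H2, e + 1, ?_, ?_⟩
    · rw [He1, pow_succ]; ring
    · rw [He2]; push_cast; ring
  | case2 pw k h =>
    intro hm hp hpw hpwdvd
    have hnd : ¬ (pw * p ∣ m) := fun hc =>
      h ⟨hm, hp, hpw, (PySem.Int.mod_eq_zero_iff_dvd m (pw * p)).mpr hc⟩
    exact ⟨hpwdvd, hnd, 0, by simp, by simp⟩

-- when p ∣ m, B's grow-the-power step agrees with the reference division-out loop
theorem pvGrowB_eq_divOut (m p : Int) (hm : 0 < m) (hp : 2 ≤ p)
    (hdvd : p ∣ m) :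
    (pvGrowB m p p 1).2 = (pvDivOutB m p 0).1 ∧
    PySem.Int.floordiv m (pvGrowB m p p 1).1 = (pvDivOutB m p 0).2 := by
  obtain ⟨H1, H2, e, He1, He2⟩ := pvGrowB_spec m p p 1 hm hp (by omega) hdvd
  have hprod := pvDivOutB_prod m p hm hp
  have hKnn := pvDivOutB_fst_nonneg m p 0 le_rfl
  have hndc := pvDivOutB_not_dvd m p 0 hm hp
  set K := (pvDivOutB m p 0).1.toNat with hK
  set c := (pvDivOutB m p 0).2 with hc
  have hp0 : (0 : Int) < p := by omega
  have hPW : (pvGrowB m p p 1).1 = p ^ (e + 1) := by rw [He1, pow_succ]; ring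
  -- e + 1 = K
  have hle1 : K ≤ e + 1 := by
    by_contra hgt
    have h2 : p ^ (e + 2) ∣ p ^ K := pow_dvd_pow p (by omega)
    have h3 : p ^ K ∣ m := Dvd.intro_left c hprod
    have h4 : p ^ (e + 2) ∣ m := h2.trans h3
    have : (pvGrowB m p p 1).1 * p ∣ m := by
      rw [hPW, ← pow_succ]
      exact h4
    exact H2 this
  have hle2 : e + 1 ≤ K := by
    by_contra hgt
    have h1 : p ^ (K + 1) ∣ m := (pow_dvd_pow p (by omega)).trans (hPW ▸ H1)
    obtain ⟨t, ht⟩ := h1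
    have hcemt : c = t * p := by
      have hcancel : c * p ^ K = (t * p) * p ^ K := by
        rw [← hprod] at ht
        rw [ht]; ring
      exact mul_right_cancel₀ (pow_ne_zero K (by omega)) hcancel
    exact hndc ⟨t, by rw [hcemt]; ring⟩
  have hEK : e + 1 = K := by omega
  constructor
  · rw [He2]
    omega
  · rw [hPW, hEK]
    have hpow : (0 : Int) < p ^ K := by positivity
    rw [PySem.Int.floordiv_eq_ediv_of_pos hpow, ← hprod]
    exact Int.mul_ediv_cancel c (by positivity)

-- B's prime scan produces exactly the pvFac parts (plus the leftover when it fits below r)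
-- terminated scan: past r the remaining m is 1 or a prime above r
theorem pvScanB_done (r : Int) (comp : List Bool) (p m : Int) (parts : List String)
    (h2 : 2 ≤ p) (hm : 0 < m) (hmr : m < (r + 1) * (r + 1)) (hNF : pvNF m p)
    (hr : 1 ≤ r) (hpr : r < p) :
    pvScanB r comp p m parts =
      ((if 1 < (pvFac m p).1 ∧ (pvFac m p).1 ≤ r then 1 else (pvFac m p).1),
       parts ++ (pvFac m p).2.map pvFmt ++
         (if 1 < (pvFac m p).1 ∧ (pvFac m p).1 ≤ r then [pvNameOf (pvFac m p).1] else [])) := by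
  have hg : ¬(2 ≤ p ∧ p ≤ r) := fun hc => by omega
  have hfac : pvFac m p = (m, []) := by
    rw [pvFac, dif_neg]
    rintro ⟨_, hpp⟩
    have hsq : (r + 1) * (r + 1) ≤ p * p := by nlinarith
    omega
  have hms : ¬(1 < (pvFac m p).1 ∧ (pvFac m p).1 ≤ r) := by
    rw [hfac]
    rintro ⟨h1, hmr2⟩
    exact hNF m (by omega) (by omega) (dvd_refl m)
  rw [hfac] at hms
  rw [pvScanB, dif_neg hg, hfac]
  simp only [if_neg hms]
  simp

theorem pvScanB_eq_fuel (N : Nat) (r : Int) (comp : List Bool)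
    (hs : ∀ x : Nat, comp.getD x false = true → pvCompN x) :
    ∀ (p m : Int) (parts : List String), (r + 1 - p).toNat ≤ N →
    2 ≤ p → 0 < m → m < (r + 1) * (r + 1) → pvNF m p → 1 ≤ r →
    pvScanB r comp p m parts =
      ((if 1 < (pvFac m p).1 ∧ (pvFac m p).1 ≤ r then 1 else (pvFac m p).1),
       parts ++ (pvFac m p).2.map pvFmt ++
         (if 1 < (pvFac m p).1 ∧ (pvFac m p).1 ≤ r then [pvNameOf (pvFac m p).1] else [])) := by
  induction N with
  | zero =>
    intro p m parts hfuel h2 hm hmr hNF hr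
    exact pvScanB_done r comp p m parts h2 hm hmr hNF hr (by omega)
  | succ N ih =>
    intro p m parts hfuel h2 hm hmr hNF hr
    by_cases hpr : p ≤ r
    case neg => exact pvScanB_done r comp p m parts h2 hm hmr hNF hr (by omega)
    have hg : 2 ≤ p ∧ p ≤ r := ⟨h2, hpr⟩
    by_cases hmod : PySem.Int.mod m p = 0
    · -- p divides m; p must be unmarked (a marked p is composite, impossible below the NF bound)
      have hpdvd : p ∣ m := (PySem.Int.mod_eq_zero_iff_dvd m p).mp hmod
      have hflag : comp.getD p.toNat false = false := by
        by_contra hcf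
        have htrue : comp.getD p.toNat false = true := by
          cases hx : comp.getD p.toNat false
          · exact absurd hx hcf
          · rfl
        obtain ⟨a, b, ha, hb, hab⟩ := hs p.toNat htrue
        have hpa : ((a : Int)) ∣ p := by
          refine ⟨(b : Int), ?_⟩
          rw [← Int.toNat_of_nonneg (by omega : (0:Int) ≤ p), hab]
          push_cast
          ring
        have haltp : (a : Int) < p := by
          have : a < a * b := by nlinarith
          omega
        exact hNF a (by exact_mod_cast ha) haltp (hpa.trans hpdvd)
      have hcond : comp.getD p.toNat false = false ∧ PySem.Int.mod m p = 0 := ⟨hflag, hmod⟩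
      rw [pvScanB, dif_pos hg, if_pos hcond]
      dsimp only
      obtain ⟨hKeq, hMeq⟩ := pvGrowB_eq_divOut m p hm h2 hpdvd
      by_cases hpp : p * p ≤ m
      · -- a genuine small prime factor: one cons step on both sides
        have hb := pvDivOutB_bounds m p 0 hm
        have hnd := pvDivOutB_not_dvd m p 0 hm h2
        have hm'dvd := pvDivOutB_dvd m p 0 hm h2
        have hNF' : pvNF (pvDivOutB m p 0).2 (p + 1) := by
          intro e he hlt hdvde
          by_cases hed : e = p
          · exact hnd (hed ▸ hdvde)
          · exact hNF e he (by omega) (hdvde.trans hm'dvd)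
        have hrec := ih (p + 1) (pvDivOutB m p 0).2
          (parts ++ [if (pvGrowB m p p 1).2 = 1 then pvNameOf p
            else pvNameOf p ++ "^" ++ PySem.Int.toStr (pvGrowB m p p 1).2])
          (by omega) (by omega) hb.1 (by omega) hNF' hr
        rw [hMeq, hrec, pvFac_cons m p ⟨h2, hpp⟩ hmod]
        simp [pvFmt, hKeq, List.append_assoc]
      · -- p ∣ m and p*p > m force m = p: the leftover prime is swallowed here
        have hmp : m = p := by
          obtain ⟨t, ht⟩ := hpdvd
          have ht1 : t = 1 := by
            by_contra htne
            have ht2 : 2 ≤ t := by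
              by_contra hlt
              have ht0 : t ≤ 0 := by omega
              nlinarith [mul_nonpos_of_nonneg_of_nonpos (show (0:Int) ≤ p by omega) ht0]
            have htdvd : t ∣ m := ⟨p, by rw [ht]; ring⟩
            have htp : p ≤ t := by
              by_contra hlt
              exact hNF t ht2 (by omega) htdvd
            nlinarith
          rw [ht, ht1, mul_one]
        have hgrow : pvGrowB m p p 1 = (p, 1) := by
          rw [pvGrowB, dif_neg]
          rintro ⟨_, _, _, hmod2⟩
          have : p * p ∣ m := (PySem.Int.mod_eq_zero_iff_dvd m (p * p)).mp hmod2
          have := Int.le_of_dvd hm this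
          nlinarith
        have hone : PySem.Int.floordiv m (pvGrowB m p p 1).1 = 1 := by
          rw [hgrow]
          simp only []
          rw [hmp, PySem.Int.floordiv_eq_ediv_of_pos (by omega : (0:Int) < p)]
          exact Int.ediv_self (by omega)
        have hNF1 : pvNF 1 (p + 1) := by
          intro e he _ hdvde
          have := Int.le_of_dvd (by omega) hdvde
          omega
        have hfac1 : pvFac 1 (p + 1) = (1, []) := by
          rw [pvFac, dif_neg]
          rintro ⟨hp1, hpp1⟩
          nlinarith
        have hrec := ih (p + 1) 1
          (parts ++ [if (pvGrowB m p p 1).2 = 1 then pvNameOf p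
            else pvNameOf p ++ "^" ++ PySem.Int.toStr (pvGrowB m p p 1).2])
          (by omega) (by omega) (by omega) (by nlinarith) hNF1 hr
        rw [hfac1] at hrec
        simp only [] at hrec
        rw [hone, hrec]
        have hfacm : pvFac m p = (m, []) := by
          rw [pvFac, dif_neg]
          rintro ⟨_, hc⟩
          exact hpp hc
        rw [hfacm]
        have hcnd : 1 < (m, ([] : List (Int × Int))).1 ∧ (m, ([] : List (Int × Int))).1 ≤ r := by
          constructor
          · simp; omega
          · simp; omega
        rw [if_pos hcnd, if_pos hcnd]
        have hcnd1 : ¬(1 < ((1 : Int), ([] : List (Int × Int))).1 ∧ ((1 : Int), ([] : List (Int × Int))).1 ≤ r) := by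
          rintro ⟨hx, _⟩
          simp at hx
        rw [if_neg hcnd1, if_neg hcnd1]
        rw [hgrow]
        simp [hmp]
    · -- p does not divide m: both sides skip p
      have hcond : ¬(comp.getD p.toNat false = false ∧ PySem.Int.mod m p = 0) :=
        fun hc => hmod hc.2
      rw [pvScanB, dif_pos hg, if_neg hcond]
      have hNF' : pvNF m (p + 1) := by
        intro e he hlt hdvde
        by_cases hed : e = p
        · exact hmod ((PySem.Int.mod_eq_zero_iff_dvd m p).mpr (hed ▸ hdvde))
        · exact hNF e he (by omega) hdvde
      have hfaceq : pvFac m p = pvFac m (p + 1) := by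
        by_cases hpp : p * p ≤ m
        · exact pvFac_skip m p ⟨h2, hpp⟩ hmod
        · have h1 : pvFac m p = (m, []) := by
            rw [pvFac, dif_neg]
            rintro ⟨_, hc⟩
            exact hpp hc
          have h2' : pvFac m (p + 1) = (m, []) := by
            rw [pvFac, dif_neg]
            rintro ⟨_, hc⟩
            have : p * p ≤ (p + 1) * (p + 1) := by nlinarith
            omega
          rw [h1, h2']
      rw [hfaceq]
      exact ih (p + 1) m parts (by omega) (by omega) hm hmr hNF' hr

-- the fresh sieve array starts all-unmarked
theorem pv_getD_replicate (k x : Nat) : (List.replicate k false).getD x false = false := by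
  rw [List.getD_eq_getElem?_getD, List.getElem?_replicate]
  split_ifs <;> rfl

-- ===== VERDICT (by name: the statement is the Claim_ definition above) =====
theorem bst_product_name_spec : Claim_equal_bst_product_name := by
  intro n _
  unfold Spec_bst_product_name
  by_cases hm1 : 1 < |n|
  · -- composite pipeline on both sides, through the common pvFac list
    have hn : n ≠ 0 := by intro h; rw [h] at hm1; simp at hm1
    obtain ⟨hr1, hr2, hr3⟩ := pvIsqrtB_spec |n| 1 le_rfl (by nlinarith)
    set r := pvIsqrtB |n| 1 with hrdef
    set comp := pvSieveB r 2 (List.replicate (r + 1).toNat false) with hcompdef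
    have hs : ∀ x : Nat, comp.getD x false = true → pvCompN x := by
      intro x hx
      rcases pvSieveB_sound r 2 (List.replicate (r + 1).toNat false) x le_rfl hx with h0 | hc
      · rw [pv_getD_replicate] at h0; exact absurd h0 (by simp)
      · exact hc
    have hscan := pvScanB_eq_fuel ((r + 1 - 2).toNat) r comp hs 2 |n| [] le_rfl le_rfl
      (by omega) (by nlinarith) (fun e he hlt => False.elim (by omega)) hr1
    have halt : bst_product_name_alt n =
        (if (if 1 < (pvScanB r comp 2 |n| []).1 then
              (pvScanB r comp 2 |n| []).2 ++ [pvNameOf (pvScanB r comp 2 |n| []).1]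
             else (pvScanB r comp 2 |n| []).2) = [] then "1"
         else PySem.Str.join "*"
            (if 1 < (pvScanB r comp 2 |n| []).1 then
              (pvScanB r comp 2 |n| []).2 ++ [pvNameOf (pvScanB r comp 2 |n| []).1]
             else (pvScanB r comp 2 |n| []).2)) := by
      rw [bst_product_name_alt]
      simp only [← hrdef, ← hcompdef]
      rw [if_pos hm1]
    rw [pvA_canon n hn, halt, hscan]
    set c := (pvFac |n| 2).1
    set P := (pvFac |n| 2).2
    by_cases hcr : 1 < c ∧ c ≤ r
    · rw [if_pos hcr, if_pos hcr]
      simp [pvFmt, hcr.1, List.map_append]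
    · rw [if_neg hcr, if_neg hcr]
      by_cases h1 : 1 < c
      · simp [pvFmt, h1, List.map_append]
      · simp [h1]
  · -- |n| ≤ 1: both return "1"
    have halt : bst_product_name_alt n = "1" := by
      rw [bst_product_name_alt]
      rw [if_neg hm1]
    rw [halt]
    by_cases hn0 : n = 0
    · subst hn0
      have hsnil : PySem.List.sorted ([] : List Int) (fun x => x) false = [] := rfl
      simp [bst_product_name, pvFactorA, hsnil]
    · have h1 : |n| = 1 := by
        have := abs_pos.mpr hn0
        omega
      have hOA : pvOuterA |n| 2 PySem.Dict.empty = (|n|, PySem.Dict.empty) := by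
        rw [pvOuterA, dif_neg]
        rintro ⟨_, hc⟩
        omega
      have hf : pvFactorA n = PySem.Dict.empty := by
        rw [pvFactorA, if_neg hn0]
        simp only [hOA]
        rw [if_neg (by omega)]
      have hsnil : PySem.List.sorted ([] : List Int) (fun x => x) false = [] := rfl
      simp [bst_product_name, hf, PySem.Dict.keys_empty, hsnil]
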